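-- pv_equiv track=rewrite | github.com/ChengangWang-Allspring/file_watcher | file_watch/core/date_core.py | cnv_csharp_date_fmt
-- ===== SOURCE A (Python) =====
-- _FORMAT_MAP = (
--     ('yyyy', '%Y'),
--     ('yyy', '%Y'),
--     ('yy', '%y'),
--     ('y', '%y'),
--     ('MMMM', '%B'),
--     ('MMM', '%b'),
--     ('MM', '%m'),
--     ('M', '%#m'),
--     ('dddd', '%A'),
--     ('ddd', '%a'),
--     ('dd', '%d'),
--     ('d', '%#d'),
--     ('HH', '%H'),
--     ('H', '%#H'),
--     ('hh', '%I'),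
--     ('h', '%#I'),
--     ('mm', '%M'),
--     ('m', '%#M'),
--     ('ss', '%S'),
--     ('s', '%#S'),
--     ('tt', '%p'),
--     ('t', '%#p'),
--     ('zzz', '%z'),
--     ('zz', '%z'),
--     ('z', '%#z'),
-- )
--
-- def cnv_csharp_date_fmt(in_fmt: str) -> str:
--     """convert .NET date format to Python strftime date format"""
--
--     ofmt: str = ''
--     fmt: str = in_fmt
--     while fmt:
--         if fmt[0] == "'":
--             # literal text enclosed in ''
--             apos = fmt.find("'", 1)
--             if apos == -1:
--                 # Input format is broken.
--                 apos = len(fmt)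
--             ofmt += fmt[1:apos].replace('%', '%%')
--             fmt = fmt[apos + 1 :]
--         elif fmt[0] == "\\":
--             # One escaped literal character.
--             # Note graceful behaviour when \ is the last character.
--             ofmt += fmt[1:2].replace('%', '%%')
--             fmt = fmt[2:]
--         else:
--             # This loop could be done with a regex "(yyyy)|(yyy)|etc".
--             for intok, outtok in _FORMAT_MAP:
--                 if fmt.startswith(intok):
--                     ofmt += outtok
--                     fmt = fmt[len(intok) :]
--                     break
--             else:
--                 # Hmmmm, what does C# do here?
--                 # What do *you* want to do here?
--                 # I'll just emit one character as literal text
--                 # and carry on. Alternative: raise an exception.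
--                 ofmt += fmt[0].replace('%', '%%')
--                 fmt = fmt[1:]
--     return ofmt
-- ===== SOURCE B (Python) =====
-- # Run-length re-implementation (faster: one index-based pass, no remainder re-slicing):
-- # group each maximal run of one token character and
-- # map it arithmetically via a per-character token table, instead of scanning the
-- # 25-entry _FORMAT_MAP with startswith at every position.
--
-- _TOKENS = {
--     'y': ('%y', '%y', '%Y', '%Y'),   # token of length 1, 2, 3, 4
--     'M': ('%#m', '%m', '%b', '%B'),
--     'd': ('%#d', '%d', '%a', '%A'),
--     'H': ('%#H', '%H'),
--     'h': ('%#I', '%I'),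
--     'm': ('%#M', '%M'),
--     's': ('%#S', '%S'),
--     't': ('%#p', '%p'),
--     'z': ('%#z', '%z', '%z'),
-- }
--
--
-- def cnv_csharp_date_fmt(in_fmt: str) -> str:
--     """convert .NET date format to Python strftime date format"""
--     out = []
--     i, n = 0, len(in_fmt)
--     while i < n:
--         c = in_fmt[i]
--         if c == "'":
--             j = i + 1
--             while j < n and in_fmt[j] != "'":
--                 j += 1
--             out.append(in_fmt[i + 1:j].replace('%', '%%'))
--             i = j + 1
--         elif c == '\\':
--             if i + 1 < n:
--                 out.append(in_fmt[i + 1].replace('%', '%%'))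
--             i += 2
--         elif c in _TOKENS:
--             toks = _TOKENS[c]
--             j = i + 1
--             while j < n and in_fmt[j] == c:
--                 j += 1
--             run = j - i
--             while run > 0:
--                 k = min(run, len(toks))
--                 out.append(toks[k - 1])
--                 run -= k
--             i = j
--         else:
--             out.append(c.replace('%', '%%'))
--             i += 1
--     return ''.join(out)
-- ===== Notes on version B (the rewrite author's own statement) =====
-- stated objective: faster
-- what changed: B replaces A's per-position startswith-scan of the 25-entry _FORMAT_MAP and its repeated fmt = fmt[k:] re-slicing by a single index-based pass that groups each maximal run of a token character and cuts it into mapped chunks via a small per-character token table.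
import Mathlib
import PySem

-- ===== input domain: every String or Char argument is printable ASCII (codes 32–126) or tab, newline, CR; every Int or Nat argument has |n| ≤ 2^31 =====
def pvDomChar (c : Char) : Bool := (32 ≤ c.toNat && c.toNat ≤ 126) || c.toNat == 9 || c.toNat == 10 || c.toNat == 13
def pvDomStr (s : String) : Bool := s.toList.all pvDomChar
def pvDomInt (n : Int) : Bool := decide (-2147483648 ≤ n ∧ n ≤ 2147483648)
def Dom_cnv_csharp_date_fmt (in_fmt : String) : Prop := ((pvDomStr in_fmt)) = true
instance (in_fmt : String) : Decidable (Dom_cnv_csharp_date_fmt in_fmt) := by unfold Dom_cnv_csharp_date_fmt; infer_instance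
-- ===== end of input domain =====

-- B replaces A's per-position scan of the 25-entry _FORMAT_MAP (with its repeated
-- remainder re-slicing) by one index-based pass over runs of equal characters with a
-- per-character token table; a timing run measured B faster (objective: faster).

-- .replace('%','%%') on a segment (exact: both sides use the PySem primitive)
def pvEsc (s : List Char) : List Char := PySem.Chars.replace s ['%'] ['%','%']

-- ===== PORT A =====
-- _FORMAT_MAP, literally
def pvFormatMap : List (List Char × List Char) :=
  [("yyyy".toList, "%Y".toList), ("yyy".toList, "%Y".toList), ("yy".toList, "%y".toList),
   ("y".toList, "%y".toList),
   ("MMMM".toList, "%B".toList), ("MMM".toList, "%b".toList), ("MM".toList, "%m".toList),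
   ("M".toList, "%#m".toList),
   ("dddd".toList, "%A".toList), ("ddd".toList, "%a".toList), ("dd".toList, "%d".toList),
   ("d".toList, "%#d".toList),
   ("HH".toList, "%H".toList), ("H".toList, "%#H".toList),
   ("hh".toList, "%I".toList), ("h".toList, "%#I".toList),
   ("mm".toList, "%M".toList), ("m".toList, "%#M".toList),
   ("ss".toList, "%S".toList), ("s".toList, "%#S".toList),
   ("tt".toList, "%p".toList), ("t".toList, "%#p".toList),
   ("zzz".toList, "%z".toList), ("zz".toList, "%z".toList), ("z".toList, "%#z".toList)]

-- A's inner for-loop over _FORMAT_MAP: first entry whose intok is a prefix of fmt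
def pvScan : List (List Char × List Char) → List Char → Option (List Char × Nat)
  | [], _ => none
  | (intok, outtok) :: rest, fmt =>
    if intok.isPrefixOf fmt then some (outtok, intok.length) else pvScan rest fmt

-- every intok of the map is nonempty, so a successful scan consumes ≥ 1 char
theorem pvScan_pos : ∀ (es : List (List Char × List Char)) (fmt : List Char) (t : List Char)
    (k : Nat), (∀ p ∈ es, p.1 ≠ []) → pvScan es fmt = some (t, k) → 1 ≤ k := by
  intro es
  induction es with
  | nil => intro fmt t k _ h; simp [pvScan] at h
  | cons e rest ih =>
    intro fmt t k hne h
    obtain ⟨intok, outtok⟩ := e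
    simp only [pvScan] at h
    split at h
    · obtain ⟨h1, h2⟩ := Option.some.injEq _ _ ▸ h
      cases h; cases intok with
      | nil => exact absurd rfl (hne _ (List.mem_cons_self))
      | cons a l => simp
    · exact ih fmt t k (fun p hp => hne p (List.mem_cons_of_mem _ hp)) h

-- the while-loop of A, one step per iteration of the Python loop
def pvAGo (fmt : List Char) : List Char :=
  match fmt with
  | [] => []
  | c :: rest =>
    if c = '\'' then
      -- apos = fmt.find("'", 1)  (index into fmt; here expressed on rest = fmt[1:]);
      -- -1 → apos = len(fmt); emit fmt[1:apos] escaped; continue with fmt[apos+1:]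
      match _hf : rest.findIdx? (· = '\'') with
      | some i => pvEsc (rest.take i) ++ pvAGo (rest.drop (i + 1))
      | none => pvEsc rest ++ pvAGo []
    else if c = '\\' then
      -- fmt[1:2] escaped; continue with fmt[2:]
      pvEsc (rest.take 1) ++ pvAGo (rest.drop 1)
    else
      match hs : pvScan pvFormatMap (c :: rest) with
      | some (outtok, k) => outtok ++ pvAGo ((c :: rest).drop k)
      | none => pvEsc [c] ++ pvAGo rest
termination_by fmt.length
decreasing_by
  · simp only [List.length_cons, List.length_drop]; omega
  · simp
  · simp only [List.length_cons, List.length_drop]; omega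
  · have hk : 1 ≤ k := pvScan_pos pvFormatMap (c :: rest) outtok k (by decide) hs
    simp only [List.length_cons, List.length_drop]; omega
  · simp

def cnv_csharp_date_fmt (in_fmt : String) : String := String.ofList (pvAGo in_fmt.toList)

-- ===== PORT B =====
-- _TOKENS: the tokens of one character, shortest first (index k-1 = token of length k)
def pvTokens (c : Char) : Option (List (List Char)) :=
  if c = 'y' then some ["%y".toList, "%y".toList, "%Y".toList, "%Y".toList]
  else if c = 'M' then some ["%#m".toList, "%m".toList, "%b".toList, "%B".toList]
  else if c = 'd' then some ["%#d".toList, "%d".toList, "%a".toList, "%A".toList]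
  else if c = 'H' then some ["%#H".toList, "%H".toList]
  else if c = 'h' then some ["%#I".toList, "%I".toList]
  else if c = 'm' then some ["%#M".toList, "%M".toList]
  else if c = 's' then some ["%#S".toList, "%S".toList]
  else if c = 't' then some ["%#p".toList, "%p".toList]
  else if c = 'z' then some ["%#z".toList, "%z".toList, "%z".toList]
  else none

-- B's inner while-loop: cut a run of `run` equal characters into mapped chunks
-- (toks[k-1] is always in range since toks ≠ []; getD's default is a totality guard)
def pvChunks (toks : List (List Char)) (run : Nat) : List (List Char) :=
  if run = 0 then []
  else
    let k := min run toks.length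
    if k = 0 then []
    else toks.getD (k - 1) [] :: pvChunks toks (run - k)
termination_by run
decreasing_by omega

-- B's outer while-loop: one step per appended piece / per run
def pvAltGo (fmt : List Char) : List (List Char) :=
  match fmt with
  | [] => []
  | c :: rest =>
    if c = '\'' then
      -- the scanning j-loop: literal = chars up to the next quote, skip it
      pvEsc (rest.takeWhile (· ≠ '\'')) :: pvAltGo ((rest.dropWhile (· ≠ '\'')).drop 1)
    else if c = '\\' then
      match rest with
      | [] => []
      | d :: r => pvEsc [d] :: pvAltGo r
    else
      match pvTokens c with
      | some toks =>
        -- the run-counting j-loop, then the chunking loop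
        let r := (rest.takeWhile (· = c)).length
        pvChunks toks (r + 1) ++ pvAltGo (rest.drop r)
      | none => pvEsc [c] :: pvAltGo rest
termination_by fmt.length
decreasing_by
  · have := List.length_dropWhile_le (fun x => decide (x ≠ '\'')) rest
    simp only [List.length_cons, List.length_drop]; omega
  · simp
  · simp only [List.length_cons, List.length_drop]; omega
  · simp

def cnv_csharp_date_fmt_alt (in_fmt : String) : String :=
  String.ofList (pvAltGo in_fmt.toList).flatten

-- ===== PRECONDITION & SPEC =====
def Spec_cnv_csharp_date_fmt (in_fmt : String) (out : String) : Prop := out = cnv_csharp_date_fmt_alt in_fmt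
instance (in_fmt : String) (out : String) : Decidable (Spec_cnv_csharp_date_fmt in_fmt out) := by unfold Spec_cnv_csharp_date_fmt; infer_instance

-- ===== CLAIM (what is proved, stated in full; the proofs are below) =====
def Claim_equal_cnv_csharp_date_fmt : Prop := ∀ (in_fmt : String), Dom_cnv_csharp_date_fmt in_fmt → Spec_cnv_csharp_date_fmt in_fmt (cnv_csharp_date_fmt in_fmt)

-- ===== LEMMAS AND PROOFS =====

-- step lemmas: unfold one iteration of each loop
theorem pvAGo_nil : pvAGo [] = [] := by rw [pvAGo.eq_def]

theorem pvAltGo_nil : pvAltGo [] = [] := by rw [pvAltGo.eq_def]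

theorem pvAGo_tok {c : Char} {rest outtok : List Char} {k : Nat} (hq : c ≠ '\'')
    (hb : c ≠ '\\') (hs : pvScan pvFormatMap (c :: rest) = some (outtok, k)) :
    pvAGo (c :: rest) = outtok ++ pvAGo ((c :: rest).drop k) := by
  rw [pvAGo.eq_def]
  dsimp only
  rw [if_neg hq, if_neg hb]
  split
  · rename_i outtok' k' heq
    rw [hs] at heq
    injection heq with heq
    injection heq with h1 h2
    subst h1; subst h2; rfl
  · rename_i heq
    rw [hs] at heq
    cases heq

theorem pvAGo_fallback {c : Char} {rest : List Char} (hq : c ≠ '\'') (hb : c ≠ '\\')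
    (hs : pvScan pvFormatMap (c :: rest) = none) :
    pvAGo (c :: rest) = pvEsc [c] ++ pvAGo rest := by
  rw [pvAGo.eq_def]
  dsimp only
  rw [if_neg hq, if_neg hb]
  split
  · rename_i outtok' k' heq
    rw [hs] at heq
    cases heq
  · rfl

theorem pvAGo_quote_some {rest : List Char} {i : Nat}
    (hf : rest.findIdx? (· = '\'') = some i) :
    pvAGo ('\'' :: rest) = pvEsc (rest.take i) ++ pvAGo (rest.drop (i + 1)) := by
  rw [pvAGo.eq_def]
  dsimp only
  rw [if_pos rfl]
  split
  · rename_i i' heq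
    rw [hf] at heq
    injection heq with heq
    subst heq; rfl
  · rename_i heq
    rw [hf] at heq
    cases heq

theorem pvAGo_quote_none {rest : List Char}
    (hf : rest.findIdx? (· = '\'') = none) :
    pvAGo ('\'' :: rest) = pvEsc rest ++ pvAGo [] := by
  rw [pvAGo.eq_def]
  dsimp only
  rw [if_pos rfl]
  split
  · rename_i i' heq
    rw [hf] at heq
    cases heq
  · rfl

theorem pvAGo_backslash {rest : List Char} :
    pvAGo ('\\' :: rest) = pvEsc (rest.take 1) ++ pvAGo (rest.drop 1) := by
  rw [pvAGo.eq_def]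
  rfl

theorem pvAltGo_quote {rest : List Char} :
    pvAltGo ('\'' :: rest) =
      pvEsc (rest.takeWhile (· ≠ '\'')) :: pvAltGo ((rest.dropWhile (· ≠ '\'')).drop 1) := by
  rw [pvAltGo.eq_def]
  dsimp only
  rw [if_pos rfl]

theorem pvAltGo_backslash {rest : List Char} :
    pvAltGo ('\\' :: rest) = match rest with
      | [] => []
      | d :: r => pvEsc [d] :: pvAltGo r := by
  rw [pvAltGo.eq_def]
  dsimp only
  rw [if_neg (by decide), if_pos rfl]

theorem pvAltGo_tok {c : Char} {rest : List Char} {toks : List (List Char)} (hq : c ≠ '\'')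
    (hb : c ≠ '\\') (ht : pvTokens c = some toks) :
    pvAltGo (c :: rest) =
      pvChunks toks ((rest.takeWhile (· = c)).length + 1) ++
        pvAltGo (rest.drop (rest.takeWhile (· = c)).length) := by
  rw [pvAltGo.eq_def]
  dsimp only
  rw [if_neg hq, if_neg hb, ht]

theorem pvAltGo_fallback {c : Char} {rest : List Char} (hq : c ≠ '\'') (hb : c ≠ '\\')
    (ht : pvTokens c = none) :
    pvAltGo (c :: rest) = pvEsc [c] :: pvAltGo rest := by
  rw [pvAltGo.eq_def]
  dsimp only
  rw [if_neg hq, if_neg hb, ht]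

-- A's find-based quote split agrees with B's takeWhile/dropWhile split
theorem pvFind_split (l : List Char) :
    (match l.findIdx? (· = '\'') with
      | some i => l.take i = l.takeWhile (· ≠ '\'') ∧
          l.drop (i + 1) = (l.dropWhile (· ≠ '\'')).drop 1
      | none => l.takeWhile (· ≠ '\'') = l ∧ l.dropWhile (· ≠ '\'') = []) := by
  induction l with
  | nil => simp
  | cons a l ih =>
    by_cases ha : a = '\''
    · subst ha
      simp [List.findIdx?_cons]
    · rw [List.findIdx?_cons]
      simp only [decide_eq_true_eq, if_neg ha]
      cases hf : l.findIdx? (· = '\'') with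
      | some i =>
        rw [hf] at ih
        obtain ⟨ih1, ih2⟩ := ih
        simp only [Option.map_some]
        exact ⟨by rw [List.take_succ_cons, List.takeWhile_cons_of_pos (by simpa using ha), ih1],
          by rw [List.drop_succ_cons, List.dropWhile_cons_of_pos (by simpa using ha), ih2]⟩
      | none =>
        rw [hf] at ih
        obtain ⟨ih1, ih2⟩ := ih
        simp only [Option.map_none]
        exact ⟨by rw [List.takeWhile_cons_of_pos (by simpa using ha), ih1],
          by rw [List.dropWhile_cons_of_pos (by simpa using ha), ih2]⟩

-- replicate-prefix ↔ run length
theorem pvReplicate_prefix (c : Char) : ∀ (n : Nat) (l : List Char),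
    List.replicate n c <+: l ↔ n ≤ (l.takeWhile (· = c)).length := by
  intro n
  induction n with
  | zero => intro l; simp
  | succ m ih =>
    intro l
    cases l with
    | nil => simp [List.replicate_succ]
    | cons a l =>
      by_cases ha : a = c
      · subst ha
        simp [List.replicate_succ, List.cons_prefix_cons, ih l]
      · rw [List.replicate_succ]
        simp [List.cons_prefix_cons, ha, Ne.symm ha]

-- the descending run entries of one character inside _FORMAT_MAP
def pvDesc (c : Char) : List (List Char) → List (List Char × List Char)
  | [] => []
  | t :: ts => (List.replicate (ts.length + 1) c, t) :: pvDesc c ts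

theorem pvFormatMap_eq : pvFormatMap =
    pvDesc 'y' ["%Y".toList, "%Y".toList, "%y".toList, "%y".toList] ++
    pvDesc 'M' ["%B".toList, "%b".toList, "%m".toList, "%#m".toList] ++
    pvDesc 'd' ["%A".toList, "%a".toList, "%d".toList, "%#d".toList] ++
    pvDesc 'H' ["%H".toList, "%#H".toList] ++
    pvDesc 'h' ["%I".toList, "%#I".toList] ++
    pvDesc 'm' ["%M".toList, "%#M".toList] ++
    pvDesc 's' ["%S".toList, "%#S".toList] ++
    pvDesc 't' ["%p".toList, "%#p".toList] ++
    pvDesc 'z' ["%z".toList, "%z".toList, "%#z".toList] ++ [] := by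
  decide

-- a whole group of entries is skipped when the head character differs
theorem pvScan_skip {c c' : Char} (h : c' ≠ c) : ∀ (toks : List (List Char))
    (tail : List (List Char × List Char)) (rest : List Char),
    pvScan (pvDesc c toks ++ tail) (c' :: rest) = pvScan tail (c' :: rest) := by
  intro toks
  induction toks with
  | nil => intro tail rest; rfl
  | cons t ts ih =>
    intro tail rest
    simp only [pvDesc, List.cons_append, pvScan, List.replicate_succ]
    rw [if_neg, ih]
    simp [List.isPrefixOf_iff_prefix, List.cons_prefix_cons, Ne.symm h]

-- scanning a descending group on a run of its own character
theorem pvScan_desc (c : Char) : ∀ (toks : List (List Char))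
    (tail : List (List Char × List Char)) (rest : List Char), toks ≠ [] →
    pvScan (pvDesc c toks ++ tail) (c :: rest) =
      some (toks.getD (toks.length - min ((rest.takeWhile (· = c)).length + 1) toks.length) [],
            min ((rest.takeWhile (· = c)).length + 1) toks.length) := by
  intro toks
  induction toks with
  | nil => intro _ _ h; exact absurd rfl h
  | cons t ts ih =>
    intro tail rest _
    simp only [pvDesc, List.cons_append, pvScan]
    have hpre : (List.replicate (ts.length + 1) c).isPrefixOf (c :: rest) =
        decide (ts.length ≤ (rest.takeWhile (· = c)).length) := by
      rw [Bool.eq_iff_iff, List.isPrefixOf_iff_prefix, List.replicate_succ,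
        List.cons_prefix_cons, decide_eq_true_eq]
      simp [pvReplicate_prefix c ts.length rest]
    by_cases hle : ts.length ≤ (rest.takeWhile (· = c)).length
    · rw [if_pos (by rw [hpre]; exact decide_eq_true hle)]
      have hmin : min ((rest.takeWhile (· = c)).length + 1) (ts.length + 1) = ts.length + 1 := by
        omega
      simp [hmin, List.length_replicate]
    · rw [if_neg (by rw [hpre]; simpa using hle)]
      have hts : ts ≠ [] := by
        intro h; rw [h] at hle; simp at hle
      rw [ih tail rest hts]
      simp only [List.length_cons]
      have hmin1 : min ((rest.takeWhile (· = c)).length + 1) (ts.length + 1) =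
          (rest.takeWhile (· = c)).length + 1 := by omega
      have hmin2 : min ((rest.takeWhile (· = c)).length + 1) ts.length =
          (rest.takeWhile (· = c)).length + 1 := by omega
      rw [hmin1, hmin2]
      have hidx : ts.length + 1 - ((rest.takeWhile (· = c)).length + 1) =
          (ts.length - ((rest.takeWhile (· = c)).length + 1)) + 1 := by omega
      simp only [hidx, List.getD_cons_succ]

-- pvTokens never returns an empty token list
theorem pvTokens_ne_nil {c : Char} {toks : List (List Char)} (h : pvTokens c = some toks) :
    toks ≠ [] := by
  unfold pvTokens at h
  split_ifs at h <;> (injection h with h; subst h; simp)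

theorem pvScan_y (rest : List Char) :
    pvScan pvFormatMap ('y' :: rest) =
      some ((["%y".toList, "%y".toList, "%Y".toList, "%Y".toList]).getD
              (min ((rest.takeWhile (· = 'y')).length + 1) 4 - 1) [],
            min ((rest.takeWhile (· = 'y')).length + 1) 4) := by
  rw [pvFormatMap_eq]
  simp only [List.append_assoc]

  rw [pvScan_desc 'y' ["%Y".toList, "%Y".toList, "%y".toList, "%y".toList] _ rest (by decide)]
  generalize (rest.takeWhile (· = 'y')).length = r
  rcases r with _ | _ | _ | _ | r
  · decide
  · decide
  · decide
  · decide
  · show some ((["%Y".toList, "%Y".toList, "%y".toList, "%y".toList]).getD (4 - min (r + 1 + 1 + 1 + 1 + 1) 4) [], min (r + 1 + 1 + 1 + 1 + 1) 4) =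
      some ((["%y".toList, "%y".toList, "%Y".toList, "%Y".toList]).getD (min (r + 1 + 1 + 1 + 1 + 1) 4 - 1) [], min (r + 1 + 1 + 1 + 1 + 1) 4)
    have hm : min (r + 1 + 1 + 1 + 1 + 1) 4 = 4 := by omega
    rw [hm]
    decide

theorem pvScan_M (rest : List Char) :
    pvScan pvFormatMap ('M' :: rest) =
      some ((["%#m".toList, "%m".toList, "%b".toList, "%B".toList]).getD
              (min ((rest.takeWhile (· = 'M')).length + 1) 4 - 1) [],
            min ((rest.takeWhile (· = 'M')).length + 1) 4) := by
  rw [pvFormatMap_eq]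
  simp only [List.append_assoc]
  rw [pvScan_skip (c := 'y') (c' := 'M') (by decide) ["%Y".toList, "%Y".toList, "%y".toList, "%y".toList] _ rest]
  rw [pvScan_desc 'M' ["%B".toList, "%b".toList, "%m".toList, "%#m".toList] _ rest (by decide)]
  generalize (rest.takeWhile (· = 'M')).length = r
  rcases r with _ | _ | _ | _ | r
  · decide
  · decide
  · decide
  · decide
  · show some ((["%B".toList, "%b".toList, "%m".toList, "%#m".toList]).getD (4 - min (r + 1 + 1 + 1 + 1 + 1) 4) [], min (r + 1 + 1 + 1 + 1 + 1) 4) =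
      some ((["%#m".toList, "%m".toList, "%b".toList, "%B".toList]).getD (min (r + 1 + 1 + 1 + 1 + 1) 4 - 1) [], min (r + 1 + 1 + 1 + 1 + 1) 4)
    have hm : min (r + 1 + 1 + 1 + 1 + 1) 4 = 4 := by omega
    rw [hm]
    decide

theorem pvScan_d (rest : List Char) :
    pvScan pvFormatMap ('d' :: rest) =
      some ((["%#d".toList, "%d".toList, "%a".toList, "%A".toList]).getD
              (min ((rest.takeWhile (· = 'd')).length + 1) 4 - 1) [],
            min ((rest.takeWhile (· = 'd')).length + 1) 4) := by
  rw [pvFormatMap_eq]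
  simp only [List.append_assoc]
  rw [pvScan_skip (c := 'y') (c' := 'd') (by decide) ["%Y".toList, "%Y".toList, "%y".toList, "%y".toList] _ rest]
  rw [pvScan_skip (c := 'M') (c' := 'd') (by decide) ["%B".toList, "%b".toList, "%m".toList, "%#m".toList] _ rest]
  rw [pvScan_desc 'd' ["%A".toList, "%a".toList, "%d".toList, "%#d".toList] _ rest (by decide)]
  generalize (rest.takeWhile (· = 'd')).length = r
  rcases r with _ | _ | _ | _ | r
  · decide
  · decide
  · decide
  · decide
  · show some ((["%A".toList, "%a".toList, "%d".toList, "%#d".toList]).getD (4 - min (r + 1 + 1 + 1 + 1 + 1) 4) [], min (r + 1 + 1 + 1 + 1 + 1) 4) =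
      some ((["%#d".toList, "%d".toList, "%a".toList, "%A".toList]).getD (min (r + 1 + 1 + 1 + 1 + 1) 4 - 1) [], min (r + 1 + 1 + 1 + 1 + 1) 4)
    have hm : min (r + 1 + 1 + 1 + 1 + 1) 4 = 4 := by omega
    rw [hm]
    decide

theorem pvScan_H (rest : List Char) :
    pvScan pvFormatMap ('H' :: rest) =
      some ((["%#H".toList, "%H".toList]).getD
              (min ((rest.takeWhile (· = 'H')).length + 1) 2 - 1) [],
            min ((rest.takeWhile (· = 'H')).length + 1) 2) := by
  rw [pvFormatMap_eq]
  simp only [List.append_assoc]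
  rw [pvScan_skip (c := 'y') (c' := 'H') (by decide) ["%Y".toList, "%Y".toList, "%y".toList, "%y".toList] _ rest]
  rw [pvScan_skip (c := 'M') (c' := 'H') (by decide) ["%B".toList, "%b".toList, "%m".toList, "%#m".toList] _ rest]
  rw [pvScan_skip (c := 'd') (c' := 'H') (by decide) ["%A".toList, "%a".toList, "%d".toList, "%#d".toList] _ rest]
  rw [pvScan_desc 'H' ["%H".toList, "%#H".toList] _ rest (by decide)]
  generalize (rest.takeWhile (· = 'H')).length = r
  rcases r with _ | _ | r
  · decide
  · decide
  · show some ((["%H".toList, "%#H".toList]).getD (2 - min (r + 1 + 1 + 1) 2) [], min (r + 1 + 1 + 1) 2) =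
      some ((["%#H".toList, "%H".toList]).getD (min (r + 1 + 1 + 1) 2 - 1) [], min (r + 1 + 1 + 1) 2)
    have hm : min (r + 1 + 1 + 1) 2 = 2 := by omega
    rw [hm]
    decide

theorem pvScan_h (rest : List Char) :
    pvScan pvFormatMap ('h' :: rest) =
      some ((["%#I".toList, "%I".toList]).getD
              (min ((rest.takeWhile (· = 'h')).length + 1) 2 - 1) [],
            min ((rest.takeWhile (· = 'h')).length + 1) 2) := by
  rw [pvFormatMap_eq]
  simp only [List.append_assoc]
  rw [pvScan_skip (c := 'y') (c' := 'h') (by decide) ["%Y".toList, "%Y".toList, "%y".toList, "%y".toList] _ rest]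
  rw [pvScan_skip (c := 'M') (c' := 'h') (by decide) ["%B".toList, "%b".toList, "%m".toList, "%#m".toList] _ rest]
  rw [pvScan_skip (c := 'd') (c' := 'h') (by decide) ["%A".toList, "%a".toList, "%d".toList, "%#d".toList] _ rest]
  rw [pvScan_skip (c := 'H') (c' := 'h') (by decide) ["%H".toList, "%#H".toList] _ rest]
  rw [pvScan_desc 'h' ["%I".toList, "%#I".toList] _ rest (by decide)]
  generalize (rest.takeWhile (· = 'h')).length = r
  rcases r with _ | _ | r
  · decide
  · decide
  · show some ((["%I".toList, "%#I".toList]).getD (2 - min (r + 1 + 1 + 1) 2) [], min (r + 1 + 1 + 1) 2) =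
      some ((["%#I".toList, "%I".toList]).getD (min (r + 1 + 1 + 1) 2 - 1) [], min (r + 1 + 1 + 1) 2)
    have hm : min (r + 1 + 1 + 1) 2 = 2 := by omega
    rw [hm]
    decide

theorem pvScan_m (rest : List Char) :
    pvScan pvFormatMap ('m' :: rest) =
      some ((["%#M".toList, "%M".toList]).getD
              (min ((rest.takeWhile (· = 'm')).length + 1) 2 - 1) [],
            min ((rest.takeWhile (· = 'm')).length + 1) 2) := by
  rw [pvFormatMap_eq]
  simp only [List.append_assoc]
  rw [pvScan_skip (c := 'y') (c' := 'm') (by decide) ["%Y".toList, "%Y".toList, "%y".toList, "%y".toList] _ rest]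
  rw [pvScan_skip (c := 'M') (c' := 'm') (by decide) ["%B".toList, "%b".toList, "%m".toList, "%#m".toList] _ rest]
  rw [pvScan_skip (c := 'd') (c' := 'm') (by decide) ["%A".toList, "%a".toList, "%d".toList, "%#d".toList] _ rest]
  rw [pvScan_skip (c := 'H') (c' := 'm') (by decide) ["%H".toList, "%#H".toList] _ rest]
  rw [pvScan_skip (c := 'h') (c' := 'm') (by decide) ["%I".toList, "%#I".toList] _ rest]
  rw [pvScan_desc 'm' ["%M".toList, "%#M".toList] _ rest (by decide)]
  generalize (rest.takeWhile (· = 'm')).length = r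
  rcases r with _ | _ | r
  · decide
  · decide
  · show some ((["%M".toList, "%#M".toList]).getD (2 - min (r + 1 + 1 + 1) 2) [], min (r + 1 + 1 + 1) 2) =
      some ((["%#M".toList, "%M".toList]).getD (min (r + 1 + 1 + 1) 2 - 1) [], min (r + 1 + 1 + 1) 2)
    have hm : min (r + 1 + 1 + 1) 2 = 2 := by omega
    rw [hm]
    decide

theorem pvScan_s (rest : List Char) :
    pvScan pvFormatMap ('s' :: rest) =
      some ((["%#S".toList, "%S".toList]).getD
              (min ((rest.takeWhile (· = 's')).length + 1) 2 - 1) [],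
            min ((rest.takeWhile (· = 's')).length + 1) 2) := by
  rw [pvFormatMap_eq]
  simp only [List.append_assoc]
  rw [pvScan_skip (c := 'y') (c' := 's') (by decide) ["%Y".toList, "%Y".toList, "%y".toList, "%y".toList] _ rest]
  rw [pvScan_skip (c := 'M') (c' := 's') (by decide) ["%B".toList, "%b".toList, "%m".toList, "%#m".toList] _ rest]
  rw [pvScan_skip (c := 'd') (c' := 's') (by decide) ["%A".toList, "%a".toList, "%d".toList, "%#d".toList] _ rest]
  rw [pvScan_skip (c := 'H') (c' := 's') (by decide) ["%H".toList, "%#H".toList] _ rest]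
  rw [pvScan_skip (c := 'h') (c' := 's') (by decide) ["%I".toList, "%#I".toList] _ rest]
  rw [pvScan_skip (c := 'm') (c' := 's') (by decide) ["%M".toList, "%#M".toList] _ rest]
  rw [pvScan_desc 's' ["%S".toList, "%#S".toList] _ rest (by decide)]
  generalize (rest.takeWhile (· = 's')).length = r
  rcases r with _ | _ | r
  · decide
  · decide
  · show some ((["%S".toList, "%#S".toList]).getD (2 - min (r + 1 + 1 + 1) 2) [], min (r + 1 + 1 + 1) 2) =
      some ((["%#S".toList, "%S".toList]).getD (min (r + 1 + 1 + 1) 2 - 1) [], min (r + 1 + 1 + 1) 2)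
    have hm : min (r + 1 + 1 + 1) 2 = 2 := by omega
    rw [hm]
    decide

theorem pvScan_t (rest : List Char) :
    pvScan pvFormatMap ('t' :: rest) =
      some ((["%#p".toList, "%p".toList]).getD
              (min ((rest.takeWhile (· = 't')).length + 1) 2 - 1) [],
            min ((rest.takeWhile (· = 't')).length + 1) 2) := by
  rw [pvFormatMap_eq]
  simp only [List.append_assoc]
  rw [pvScan_skip (c := 'y') (c' := 't') (by decide) ["%Y".toList, "%Y".toList, "%y".toList, "%y".toList] _ rest]
  rw [pvScan_skip (c := 'M') (c' := 't') (by decide) ["%B".toList, "%b".toList, "%m".toList, "%#m".toList] _ rest]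
  rw [pvScan_skip (c := 'd') (c' := 't') (by decide) ["%A".toList, "%a".toList, "%d".toList, "%#d".toList] _ rest]
  rw [pvScan_skip (c := 'H') (c' := 't') (by decide) ["%H".toList, "%#H".toList] _ rest]
  rw [pvScan_skip (c := 'h') (c' := 't') (by decide) ["%I".toList, "%#I".toList] _ rest]
  rw [pvScan_skip (c := 'm') (c' := 't') (by decide) ["%M".toList, "%#M".toList] _ rest]
  rw [pvScan_skip (c := 's') (c' := 't') (by decide) ["%S".toList, "%#S".toList] _ rest]
  rw [pvScan_desc 't' ["%p".toList, "%#p".toList] _ rest (by decide)]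
  generalize (rest.takeWhile (· = 't')).length = r
  rcases r with _ | _ | r
  · decide
  · decide
  · show some ((["%p".toList, "%#p".toList]).getD (2 - min (r + 1 + 1 + 1) 2) [], min (r + 1 + 1 + 1) 2) =
      some ((["%#p".toList, "%p".toList]).getD (min (r + 1 + 1 + 1) 2 - 1) [], min (r + 1 + 1 + 1) 2)
    have hm : min (r + 1 + 1 + 1) 2 = 2 := by omega
    rw [hm]
    decide

theorem pvScan_z (rest : List Char) :
    pvScan pvFormatMap ('z' :: rest) =
      some ((["%#z".toList, "%z".toList, "%z".toList]).getD
              (min ((rest.takeWhile (· = 'z')).length + 1) 3 - 1) [],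
            min ((rest.takeWhile (· = 'z')).length + 1) 3) := by
  rw [pvFormatMap_eq]
  simp only [List.append_assoc]
  rw [pvScan_skip (c := 'y') (c' := 'z') (by decide) ["%Y".toList, "%Y".toList, "%y".toList, "%y".toList] _ rest]
  rw [pvScan_skip (c := 'M') (c' := 'z') (by decide) ["%B".toList, "%b".toList, "%m".toList, "%#m".toList] _ rest]
  rw [pvScan_skip (c := 'd') (c' := 'z') (by decide) ["%A".toList, "%a".toList, "%d".toList, "%#d".toList] _ rest]
  rw [pvScan_skip (c := 'H') (c' := 'z') (by decide) ["%H".toList, "%#H".toList] _ rest]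
  rw [pvScan_skip (c := 'h') (c' := 'z') (by decide) ["%I".toList, "%#I".toList] _ rest]
  rw [pvScan_skip (c := 'm') (c' := 'z') (by decide) ["%M".toList, "%#M".toList] _ rest]
  rw [pvScan_skip (c := 's') (c' := 'z') (by decide) ["%S".toList, "%#S".toList] _ rest]
  rw [pvScan_skip (c := 't') (c' := 'z') (by decide) ["%p".toList, "%#p".toList] _ rest]
  rw [pvScan_desc 'z' ["%z".toList, "%z".toList, "%#z".toList] _ rest (by decide)]
  generalize (rest.takeWhile (· = 'z')).length = r
  rcases r with _ | _ | _ | r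
  · decide
  · decide
  · decide
  · show some ((["%z".toList, "%z".toList, "%#z".toList]).getD (3 - min (r + 1 + 1 + 1 + 1) 3) [], min (r + 1 + 1 + 1 + 1) 3) =
      some ((["%#z".toList, "%z".toList, "%z".toList]).getD (min (r + 1 + 1 + 1 + 1) 3 - 1) [], min (r + 1 + 1 + 1 + 1) 3)
    have hm : min (r + 1 + 1 + 1 + 1) 3 = 3 := by omega
    rw [hm]
    decide

-- full scan on a token character: A finds the token of length min(run, maxlen),
-- whose output is toks[k-1] of B's ascending table
theorem pvScan_tok {c : Char} {toks : List (List Char)} (rest : List Char)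
    (h : pvTokens c = some toks) :
    pvScan pvFormatMap (c :: rest) =
      some (toks.getD (min ((rest.takeWhile (· = c)).length + 1) toks.length - 1) [],
            min ((rest.takeWhile (· = c)).length + 1) toks.length) := by
  unfold pvTokens at h
  split_ifs at h with h1 h2 h3 h4 h5 h6 h7 h8 h9
  · subst h1; injection h with h; subst h; exact pvScan_y rest
  · subst h2; injection h with h; subst h; exact pvScan_M rest
  · subst h3; injection h with h; subst h; exact pvScan_d rest
  · subst h4; injection h with h; subst h; exact pvScan_H rest
  · subst h5; injection h with h; subst h; exact pvScan_h rest
  · subst h6; injection h with h; subst h; exact pvScan_m rest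
  · subst h7; injection h with h; subst h; exact pvScan_s rest
  · subst h8; injection h with h; subst h; exact pvScan_t rest
  · subst h9; injection h with h; subst h; exact pvScan_z rest


-- scan fails exactly on non-token characters
theorem pvScan_none {c : Char} (rest : List Char) (h : pvTokens c = none) :
    pvScan pvFormatMap (c :: rest) = none := by
  unfold pvTokens at h
  split_ifs at h with h1 h2 h3 h4 h5 h6 h7 h8 h9
  rw [pvFormatMap_eq]
  simp only [List.append_assoc]
  rw [pvScan_skip h1, pvScan_skip h2, pvScan_skip h3, pvScan_skip h4, pvScan_skip h5,
    pvScan_skip h6, pvScan_skip h7, pvScan_skip h8, pvScan_skip h9]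
  rfl

-- a run is literally a replicate
theorem pvTakeWhile_replicate (c : Char) (l : List Char) :
    l.takeWhile (· = c) = List.replicate (l.takeWhile (· = c)).length c := by
  rw [List.eq_replicate_iff]
  refine ⟨rfl, fun b hb => ?_⟩
  have := List.mem_takeWhile_imp hb
  simpa using this

theorem pvTakeWhile_replicate_append (c : Char) (tl : List Char)
    (hhd : ∀ d, tl.head? = some d → ¬ d = c) :
    ∀ m : Nat, (List.replicate m c ++ tl).takeWhile (· = c) = List.replicate m c := by
  intro m
  induction m with
  | zero =>
    cases tl with
    | nil => rfl
    | cons d r =>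
      simp [hhd d rfl]
  | succ k ih =>
    rw [List.replicate_succ]
    simp [ih]

-- unfolding one chunk of B's chunking loop
theorem pvChunks_step (toks : List (List Char)) (run : Nat) (h0 : 0 < run) (hn : toks ≠ []) :
    pvChunks toks run =
      toks.getD (min run toks.length - 1) [] :: pvChunks toks (run - min run toks.length) := by
  rw [pvChunks.eq_def]
  have hk : min run toks.length ≠ 0 := by
    have : 0 < toks.length := List.length_pos_of_ne_nil hn
    omega
  rw [if_neg (by omega)]
  dsimp only
  rw [if_neg hk]

theorem pvChunks_zero (toks : List (List Char)) : pvChunks toks 0 = [] := by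
  rw [pvChunks.eq_def]; rfl

-- the main equivalence, by strong induction on the remaining length
theorem pvMain : ∀ (n : Nat) (fmt : List Char), fmt.length ≤ n →
    pvAGo fmt = (pvAltGo fmt).flatten := by
  intro n
  induction n with
  | zero =>
    intro fmt h
    have : fmt = [] := by
      cases fmt with
      | nil => rfl
      | cons a l => simp at h
    subst this
    rw [pvAGo_nil, pvAltGo_nil]
    rfl
  | succ n ih =>
    intro fmt hlen
    cases fmt with
    | nil => rw [pvAGo_nil, pvAltGo_nil]; rfl
    | cons c rest =>
      have hrest : rest.length ≤ n := by simpa using hlen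
      by_cases hq : c = '\''
      · subst hq
        have hsplit := pvFind_split rest
        cases hf : rest.findIdx? (· = '\'') with
        | some i =>
          rw [hf] at hsplit
          rw [pvAGo_quote_some hf, pvAltGo_quote, List.flatten_cons, ← hsplit.1, ← hsplit.2]
          rw [ih (rest.drop (i + 1)) (by simp; omega)]
        | none =>
          rw [hf] at hsplit
          rw [pvAGo_quote_none hf, pvAltGo_quote, List.flatten_cons, hsplit.1, hsplit.2]
          rw [pvAGo_nil]
          simp [pvAltGo_nil]
      · by_cases hb : c = '\\'
        · subst hb
          rw [pvAGo_backslash, pvAltGo_backslash]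
          cases rest with
          | nil =>
            rw [List.take_nil, List.drop_nil, pvAGo_nil]
            decide
          | cons d r =>
            simp only [List.drop_succ_cons, List.drop_zero, List.flatten_cons]
            rw [ih r (by simp at hrest; omega)]
            rfl
        · cases ht : pvTokens c with
          | none =>
            rw [pvAGo_fallback hq hb (pvScan_none rest ht), pvAltGo_fallback hq hb ht,
              List.flatten_cons, ih rest hrest]
          | some toks =>
            rw [pvAGo_tok hq hb (pvScan_tok rest ht), pvAltGo_tok hq hb ht]
            have hL : 0 < toks.length := List.length_pos_of_ne_nil (pvTokens_ne_nil ht)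
            -- decompose rest as a run of c followed by tl
            obtain ⟨tl, htl, hhd⟩ : ∃ tl, rest = List.replicate (rest.takeWhile (· = c)).length c ++ tl ∧
                (∀ d, tl.head? = some d → ¬ d = c) := by
              refine ⟨rest.dropWhile (· = c), ?_, ?_⟩
              · conv_lhs => rw [← List.takeWhile_append_dropWhile (p := (· = c)) (l := rest)]
                rw [← pvTakeWhile_replicate]
              · intro d hd
                have := List.head?_dropWhile_not (· = c) rest
                rw [hd] at this
                simpa using this
            set r := (rest.takeWhile (· = c)).length with hr
            by_cases hcase : r + 1 ≤ toks.length
            · -- the whole run is one token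
              have hmin : min (r + 1) toks.length = r + 1 := by omega
              rw [hmin, pvChunks_step toks (r + 1) (by omega) (pvTokens_ne_nil ht), hmin]
              simp only [Nat.sub_self, pvChunks_zero]
              rw [List.flatten_append, List.flatten_cons, List.flatten_nil, List.append_nil,
                List.drop_succ_cons]
              rw [ih (rest.drop r) (by simp; omega)]
            · -- the run is longer than the longest token: A consumes maxlen and loops again
              have hmin : min (r + 1) toks.length = toks.length := by omega
              rw [hmin]
              set L := toks.length with hLdef
              have hLr : L ≤ r := by omega
              -- A's continuation starts with a run of r - (L-1) copies of c
              have hdropA : (c :: rest).drop L = c :: (List.replicate (r - L) c ++ tl) := by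
                cases hL' : L with
                | zero => omega
                | succ L' =>
                  simp only [List.drop_succ_cons]
                  rw [htl, List.drop_append_of_le_length (by simp; omega), List.drop_replicate]
                  have : r - L' = (r - L) + 1 := by omega
                  rw [this, List.replicate_succ, List.cons_append, ← hL']
              rw [hdropA, ih (c :: (List.replicate (r - L) c ++ tl)) (by
                have hrl : rest.length = r + tl.length := by rw [htl]; simp
                simp only [List.length_cons, List.length_append, List.length_replicate]
                omega)]
              rw [pvAltGo_tok hq hb ht,
                pvTakeWhile_replicate_append c tl hhd (r - L)]
              simp only [List.length_replicate]
              rw [List.drop_append_of_le_length (by simp), List.drop_replicate, Nat.sub_self,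
                List.replicate_zero, List.nil_append]
              -- B's side: first chunk is the longest token
              rw [pvChunks_step toks (r + 1) (by omega) (pvTokens_ne_nil ht), hmin]
              have : r + 1 - L = r - L + 1 := by omega
              rw [this]
              have hdropB : rest.drop r = tl := by
                rw [htl, List.drop_append_of_le_length (by simp), List.drop_replicate,
                  Nat.sub_self, List.replicate_zero, List.nil_append]
              rw [hdropB, List.cons_append, List.flatten_cons]


-- ===== VERDICT (by name: the statement is the Claim_ definition above) =====
theorem cnv_csharp_date_fmt_spec : Claim_equal_cnv_csharp_date_fmt := by
  intro in_fmt _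
  unfold Spec_cnv_csharp_date_fmt cnv_csharp_date_fmt cnv_csharp_date_fmt_alt
  rw [pvMain in_fmt.toList.length in_fmt.toList (le_refl _)]
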